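-- pv_equiv track=rewrite | github.com/mukesudo/Afaan-Oromoo-Stemmer-using-python-and-NLTK | Afaan-Oromoo-Stemmer.py | MeasureVC
-- ===== SOURCE A (Python) =====
-- OromooConsonants = {'b', 'c', 'd', 'f', 'g', 'h', 'j', 'k', 'l', 'm', 'n', 'p', 'q', 'r', 's', 't', 'v', 'w', 'x', 'y', 'z', '`'}
--
-- def IsConsonant(word,i):
--     if word[i] in OromooConsonants:
--         return True                    #this block of code returns true if the word[i] is a consonant,
--                                         # returns false if the word is vowel
--     else:
--         return not IsConsonant(word,i-1)
--
-- def MeasureVC(stem):                    #This block of code tries to numerate how many vowel-consenant sequencce is there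
--     cv_sequence = ''                    #in the stem word after being stemmed
--     for k in range(len(stem)):
--         if IsConsonant(stem, k):
--             cv_sequence += 'c'
--         else:
--             cv_sequence += 'v'
--     return cv_sequence.count('vc')
-- ===== SOURCE B (Python) =====
-- OromooConsonants = {'b', 'c', 'd', 'f', 'g', 'h', 'j', 'k', 'l', 'm', 'n', 'p', 'q', 'r', 's', 't', 'v', 'w', 'x', 'y', 'z', '`'}
--
-- def MeasureVC(stem):
--     n = len(stem)
--     if n == 0:
--         return 0
--     # rightmost consonant position (A's recursion wraps through negative
--     # indices and stops at this character)
--     j = n - 1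
--     while j >= 0 and stem[j] not in OromooConsonants:
--         j -= 1
--     if j < 0:
--         return 0
--     prev = stem[0] in OromooConsonants or (n - j) % 2 == 0
--     count = 0
--     for k in range(1, n):
--         cur = stem[k] in OromooConsonants or not prev
--         if cur and not prev:
--             count += 1
--         prev = cur
--     return count
-- ===== Notes on version B (the rewrite author's own statement) =====
-- stated objective: faster
-- what changed: A classifies each position by re-running a recursive backward scan (quadratic, building a 'cv' string and counting 'vc' substrings); B finds the rightmost consonant once, then does a single left-to-right pass that carries the previous classification and counts vowel-to-consonant transitions directly.
import Mathlib
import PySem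

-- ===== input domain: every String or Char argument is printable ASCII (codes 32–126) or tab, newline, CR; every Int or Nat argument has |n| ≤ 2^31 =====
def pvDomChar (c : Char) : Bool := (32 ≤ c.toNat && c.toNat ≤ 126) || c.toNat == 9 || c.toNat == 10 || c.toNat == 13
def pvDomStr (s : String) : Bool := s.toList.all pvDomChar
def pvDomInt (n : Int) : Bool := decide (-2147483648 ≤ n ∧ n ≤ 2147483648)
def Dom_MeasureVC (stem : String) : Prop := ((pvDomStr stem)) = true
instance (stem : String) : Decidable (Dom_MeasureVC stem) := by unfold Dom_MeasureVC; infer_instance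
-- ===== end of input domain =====

-- B replaces A's per-position recursive backward scan (quadratic, via a 'cv' string and a
-- substring count) by one left-to-right pass carrying the previous classification; objective: faster.

-- ===== PORT A =====
-- the module-level constant OromooConsonants (a set of single characters)
def oromooConsonants : List Char :=
  ['b', 'c', 'd', 'f', 'g', 'h', 'j', 'k', 'l', 'm', 'n', 'p', 'q', 'r', 's', 't', 'v', 'w', 'x', 'y', 'z', '`']
def isConsChar (c : Char) : Bool := oromooConsonants.contains c
theorem pyGet?_some_lb {α : Type} (xs : List α) (i : Int) (c : α)
    (h : PySem.List.pyGet? xs i = some c) : -(xs.length : Int) ≤ i := by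
  unfold PySem.List.pyGet? PySem.List.pyIdx? at h
  split_ifs at h <;> first | omega | simp at h
def IsConsonantA (word : List Char) (i : Int) : Option Bool :=
  match h : PySem.List.pyGet? word i with
  | none => none
  | some c =>
      if isConsChar c then some true
      else (IsConsonantA word (i - 1)).map (fun b => !b)
termination_by (i + word.length + 1).toNat
decreasing_by
  have := pyGet?_some_lb word i c h
  omega

def MeasureVC (stem : String) : Int :=
  let w := stem.toList
  let seq : Option (List Char) :=
    (PySem.List.pyRange 0 w.length 1).foldl
      (fun acc k => acc.bind fun s =>
        (IsConsonantA w k).map fun b => s ++ [if b then 'c' else 'v'])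
      (some [])
  match seq with
  | some s => (PySem.Chars.count s ['v', 'c'] : Int)
  | none => 0

-- ===== PORT B =====
def lastConsGo (w : List Char) : Nat → Int
  | 0 => -1
  | k + 1 => if isConsChar (PySem.List.pyGetD w (k : Int) ' ') then (k : Int) else lastConsGo w k

def MeasureVC_alt (stem : String) : Int :=
  let w := stem.toList
  if w.length = 0 then 0
  else
    let j := lastConsGo w w.length
    if j < 0 then 0
    else
      let prev0 : Bool :=
        isConsChar (PySem.List.pyGetD w 0 ' ') || (PySem.Int.mod ((w.length : Int) - j) 2 == 0)
      let r : Bool × Int :=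
        (PySem.List.pyRange 1 w.length 1).foldl
          (fun st k =>
            let cur : Bool := isConsChar (PySem.List.pyGetD w k ' ') || !st.1
            (cur, if cur && !st.1 then st.2 + 1 else st.2))
          (prev0, 0)
      r.2

-- ===== PRECONDITION & SPEC =====
-- Pre_ excludes exactly the inputs on which A raises: a non-empty stem with no consonant
-- character, where A's backward scan runs off word[-len] (IndexError).
def Pre_MeasureVC (stem : String) : Prop :=
  stem.toList = [] ∨ stem.toList.any (fun c => oromooConsonants.contains c) = true
instance (stem : String) : Decidable (Pre_MeasureVC stem) := by unfold Pre_MeasureVC; infer_instance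

def pvWitness_MeasureVC : String := "oba"

def Spec_MeasureVC (stem : String) (out : Int) : Prop := out = MeasureVC_alt stem
instance (stem : String) (out : Int) : Decidable (Spec_MeasureVC stem out) := by unfold Spec_MeasureVC; infer_instance

-- ===== CLAIM (what is proved, stated in full; the proofs are below) =====
def Claim_equal_MeasureVC : Prop := ∀ (stem : String), Dom_MeasureVC stem → Pre_MeasureVC stem → Spec_MeasureVC stem (MeasureVC stem)

-- ===== LEMMAS AND PROOFS =====

theorem isConsA_true (w : List Char) (i : Int) (c : Char)
    (h : PySem.List.pyGet? w i = some c) (hc : isConsChar c = true) :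
    IsConsonantA w i = some true := by
  rw [IsConsonantA]
  split
  · simp_all
  · rename_i c' heq
    rw [h] at heq; injection heq with heq; subst heq; simp [hc]

theorem isConsA_step (w : List Char) (i : Int) (c : Char)
    (h : PySem.List.pyGet? w i = some c) (hc : isConsChar c = false) :
    IsConsonantA w i = (IsConsonantA w (i - 1)).map (fun b => !b) := by
  rw [IsConsonantA]
  split
  · simp_all
  · rename_i c' heq
    rw [h] at heq; injection heq with heq; subst heq; simp [hc]

theorem pyGet?_neg {α : Type} (xs : List α) (p : Nat) (hp : p < xs.length) :
    PySem.List.pyGet? xs ((p : Int) - xs.length) = xs[p]? := by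
  unfold PySem.List.pyGet? PySem.List.pyIdx?
  have h1 : ¬ (0 ≤ (p : Int) - xs.length) := by omega
  have h2 : -(xs.length : Int) ≤ (p : Int) - xs.length := by omega
  simp only [h1, if_false, h2, if_true, Option.bind_some, if_pos]
  congr 1
  omega

theorem isConsA_neg (w : List Char) (m : Nat)
    (hm : m < w.length) (hcons : isConsChar (w.getD m ' ') = true)
    (hlast : ∀ i : Nat, m < i → i < w.length → isConsChar (w.getD i ' ') = false) :
    ∀ d : Nat, m + d < w.length →
      IsConsonantA w (((m + d : Nat) : Int) - w.length) = some (d % 2 == 0) := by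
  intro d
  induction d with
  | zero =>
    intro hd
    have hget : PySem.List.pyGet? w (((m + 0 : Nat) : Int) - w.length) = some (w.getD m ' ') := by
      rw [pyGet?_neg w (m + 0) (by omega)]
      simp [List.getElem?_eq_getElem (by omega : m + 0 < w.length), List.getD_eq_getElem?_getD,
        List.getElem?_eq_getElem (by omega : m < w.length)]
    rw [isConsA_true w _ _ hget hcons]
    simp
  | succ d ih =>
    intro hd
    have hlt : m + d < w.length := by omega
    have hnc : isConsChar (w.getD (m + (d+1)) ' ') = false := hlast _ (by omega) hd
    have hget : PySem.List.pyGet? w (((m + (d+1) : Nat) : Int) - w.length) = some (w.getD (m + (d+1)) ' ') := by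
      rw [pyGet?_neg w (m + (d+1)) hd]
      simp [List.getD_eq_getElem?_getD, List.getElem?_eq_getElem hd]
    rw [isConsA_step w _ _ hget hnc]
    have harg : ((m + (d+1) : Nat) : Int) - w.length - 1 = ((m + d : Nat) : Int) - w.length := by
      push_cast; ring
    rw [harg, ih hlt]
    simp only [Option.map_some]
    congr 1
    rcases Nat.even_or_odd d with he | ho
    · have h2 : d % 2 = 0 := Nat.even_iff.mp he
      have h3 : (d + 1) % 2 = 1 := by omega
      simp [h2, h3]
    · have h2 : d % 2 = 1 := Nat.odd_iff.mp ho
      have h3 : (d + 1) % 2 = 0 := by omega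
      simp [h2, h3]

def bcl (w : List Char) (p0 : Bool) : Nat → Bool
  | 0 => p0
  | k + 1 => isConsChar (w.getD (k + 1) ' ') || !bcl w p0 k

theorem isConsA_zero (w : List Char) (m : Nat)
    (hw : 0 < w.length) (hm : m < w.length) (hcons : isConsChar (w.getD m ' ') = true)
    (hlast : ∀ i : Nat, m < i → i < w.length → isConsChar (w.getD i ' ') = false) :
    IsConsonantA w 0 =
      some (isConsChar (w.getD 0 ' ') || (PySem.Int.mod ((w.length : Int) - m) 2 == 0)) := by
  have hget : PySem.List.pyGet? w 0 = some (w.getD 0 ' ') := by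
    have := PySem.List.pyGet?_natCast w 0
    simp at this
    simp [this, List.getD_eq_getElem?_getD, List.getElem?_eq_getElem hw]
  by_cases h0 : isConsChar (w.getD 0 ' ') = true
  · rw [isConsA_true w 0 _ hget h0, h0]
    simp
  · have h0' : isConsChar (w.getD 0 ' ') = false := by simp_all
    -- 0 is not a consonant, so m ≠ 0 and the recursion enters the negative phase
    have hm0 : 0 < m ∨ m = 0 := by omega
    have hmpos : m ≠ 0 := by
      intro h; rw [h] at hcons; simp_all
    have hstep := isConsA_step w 0 _ hget h0'
    have harg : (0 : Int) - 1 = ((m + (w.length - 1 - m) : Nat) : Int) - w.length := by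
      push_cast; omega
    have hneg := isConsA_neg w m hm hcons hlast (w.length - 1 - m) (by omega)
    rw [hstep, harg, hneg]
    rw [h0']
    simp only [Option.map_some, Bool.false_or]
    congr 1
    have hc : ((w.length : Int) - m) = (((w.length - m : Nat) : Int)) := by push_cast; omega
    rw [hc, show (2:Int) = ((2:Nat):Int) from rfl, PySem.Int.mod_natCast]
    have hd : w.length - 1 - m + 1 = w.length - m := by omega
    rcases Nat.even_or_odd (w.length - 1 - m) with he | ho
    · have h2 : (w.length - 1 - m) % 2 = 0 := Nat.even_iff.mp he
      have h3 : (w.length - m) % 2 = 1 := by omega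
      simp [h2, h3]
    · have h2 : (w.length - 1 - m) % 2 = 1 := Nat.odd_iff.mp ho
      have h3 : (w.length - m) % 2 = 0 := by omega
      simp [h2, h3]

theorem isConsA_pos (w : List Char) (p0 : Bool) (h0 : IsConsonantA w 0 = some p0) :
    ∀ k : Nat, k < w.length → IsConsonantA w (k : Int) = some (bcl w p0 k) := by
  intro k
  induction k with
  | zero => intro _; simpa [bcl] using h0
  | succ k ih =>
    intro hk
    have hget : PySem.List.pyGet? w ((k + 1 : Nat) : Int) = some (w.getD (k + 1) ' ') := by
      rw [PySem.List.pyGet?_natCast]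
      simp [List.getD_eq_getElem?_getD, List.getElem?_eq_getElem hk]
    by_cases hc : isConsChar (w.getD (k + 1) ' ') = true
    · rw [isConsA_true w _ _ hget hc,
        show bcl w p0 (k+1) = (isConsChar (w.getD (k+1) ' ') || !bcl w p0 k) from rfl, hc]
      simp
    · have hc' : isConsChar (w.getD (k + 1) ' ') = false := by simp_all
      rw [isConsA_step w _ _ hget hc']
      have harg : ((k + 1 : Nat) : Int) - 1 = (k : Int) := by push_cast; ring
      rw [harg, ih (by omega),
        show bcl w p0 (k+1) = (isConsChar (w.getD (k+1) ' ') || !bcl w p0 k) from rfl, hc']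
      simp

def clsChar (b : Bool) : Char := if b then 'c' else 'v'

def vcPairs : List Char → Nat
  | [] => 0
  | [_] => 0
  | x :: y :: t => if x = 'v' ∧ y = 'c' then vcPairs t + 1 else vcPairs (y :: t)

theorem vcPairs_nil : vcPairs [] = 0 := rfl

theorem vcPairs_singleton (c : Char) : vcPairs [c] = 0 := rfl

theorem vcPairs_vc_cons (t : List Char) : vcPairs ('v' :: 'c' :: t) = vcPairs t + 1 := by
  rw [vcPairs, if_pos ⟨rfl, rfl⟩]

theorem vcPairs_cons_of_ne (x y : Char) (t : List Char) (h : ¬(x = 'v' ∧ y = 'c')) :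
    vcPairs (x :: y :: t) = vcPairs (y :: t) := by
  rw [vcPairs, if_neg h]

theorem vcPairs_pair (x ch : Char) :
    vcPairs [x, ch] = if x = 'v' ∧ ch = 'c' then 1 else 0 := by
  rw [vcPairs]
  split <;> rfl

theorem vcPairs_append_singleton (s : List Char) (ch : Char) :
    vcPairs (s ++ [ch]) =
      vcPairs s + (if s.getLast? = some 'v' ∧ ch = 'c' then 1 else 0) := by
  induction s using vcPairs.induct with
  | case1 => simp [vcPairs_nil, vcPairs_singleton]
  | case2 x =>
    simp only [List.singleton_append, List.getLast?_singleton]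
    rw [vcPairs_pair, vcPairs_singleton]
    simp [Option.some.injEq]
  | case3 x y t hxy ih =>
    simp only [List.cons_append] at *
    rw [vcPairs, if_pos hxy, List.getLast?_cons_cons]
    obtain ⟨h1, h2⟩ := hxy
    subst h1; subst h2
    cases t with
    | nil =>
      rw [show (([] : List Char) ++ [ch]) = [ch] from rfl, vcPairs_singleton,
        vcPairs_vc_cons, vcPairs_nil, List.getLast?_singleton]
      simp
    | cons z t' =>
      rw [ih, vcPairs_vc_cons, List.getLast?_cons_cons]
      omega
  | case4 x y t hxy ih =>
    simp only [List.cons_append] at *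
    rw [vcPairs, if_neg hxy, ih, vcPairs_cons_of_ne x y t hxy, List.getLast?_cons_cons]

theorem countVC_go (fuel : Nat) : ∀ (s : List Char) (acc : Nat), s.length ≤ fuel →
    PySem.Chars.count.go ['v', 'c'] fuel s acc = acc + vcPairs s := by
  induction fuel with
  | zero =>
    intro s acc h
    have : s = [] := by cases s <;> simp_all
    subst this
    simp [PySem.Chars.count.go, vcPairs_nil]
  | succ fuel ih =>
    intro s acc h
    match s with
    | [] => simp [PySem.Chars.count.go, vcPairs_nil]
    | x :: t =>
      rw [PySem.Chars.count.go]
      cases t with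
      | nil =>
        have hp : List.isPrefixOf ['v', 'c'] [x] = false := by
          simp [List.isPrefixOf]
        rw [hp]
        simp only [Bool.false_eq_true, if_false]
        rw [ih [] acc (by simp)]
        rw [vcPairs_singleton, vcPairs_nil]
      | cons y t' =>
        by_cases hxy : x = 'v' ∧ y = 'c'
        · obtain ⟨h1, h2⟩ := hxy
          subst h1; subst h2
          have hp : List.isPrefixOf ['v', 'c'] ('v' :: 'c' :: t') = true := by
            simp [List.isPrefixOf]
          rw [hp]
          simp only [if_true]
          have hdrop : List.drop (['v', 'c'] : List Char).length ('v' :: 'c' :: t') = t' := rfl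
          rw [hdrop, ih t' (acc + 1) (by simp at h ⊢; omega), vcPairs_vc_cons]
          omega
        · have hp : List.isPrefixOf ['v', 'c'] (x :: y :: t') = false := by
            simp [List.isPrefixOf]
            intro h1 h2
            exact absurd ⟨h1.symm, h2.symm⟩ hxy
          rw [hp]
          simp only [Bool.false_eq_true, if_false]
          rw [ih (y :: t') acc (by simp at h ⊢; omega), vcPairs_cons_of_ne x y t' hxy]

theorem countVC_eq (s : List Char) : PySem.Chars.count s ['v', 'c'] = vcPairs s := by
  unfold PySem.Chars.count
  rw [if_neg (by simp)]
  rw [countVC_go s.length s 0 le_rfl]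
  omega

theorem foldA (w : List Char) (p0 : Bool)
    (h : ∀ k : Nat, k < w.length → IsConsonantA w (k : Int) = some (bcl w p0 k)) :
    ∀ m : Nat, m ≤ w.length →
    (PySem.List.pyRange 0 m 1).foldl
      (fun acc k => acc.bind fun s =>
        (IsConsonantA w k).map fun b => s ++ [if b then 'c' else 'v'])
      (some []) = some ((List.range m).map (fun k => clsChar (bcl w p0 k))) := by
  intro m
  induction m with
  | zero => intro _; simp [PySem.List.pyRange_one_eq_nil]
  | succ m ih =>
    intro hm
    have hsplit : PySem.List.pyRange 0 (m + 1 : Nat) 1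
        = PySem.List.pyRange 0 (m : Nat) 1 ++ [(m : Int)] := by
      have := PySem.List.pyRange_one_succ_right (a := 0) (b := (m : Int)) (by positivity)
      have hc : ((m + 1 : Nat) : Int) = (m : Int) + 1 := by push_cast; ring
      rw [hc, this]
    rw [hsplit, List.foldl_append, ih (by omega)]
    simp only [List.foldl_cons, List.foldl_nil, Option.bind_some]
    rw [h m (by omega)]
    rw [List.range_succ, List.map_append]
    rfl

theorem foldB (w : List Char) (p0 : Bool) :
    ∀ m : Nat, 1 ≤ m → m ≤ w.length →
    (PySem.List.pyRange 1 m 1).foldl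
      (fun st k =>
        let cur : Bool := isConsChar (PySem.List.pyGetD w k ' ') || !st.1
        (cur, if cur && !st.1 then st.2 + 1 else st.2))
      (p0, 0)
    = (bcl w p0 (m - 1), (vcPairs ((List.range m).map (fun k => clsChar (bcl w p0 k))) : Int)) := by
  intro m h1 h2
  induction m, h1 using Nat.le_induction with
  | base =>
    rw [PySem.List.pyRange_one_eq_nil (by norm_num)]
    simp [bcl, List.range_one, clsChar, vcPairs_singleton]
  | succ m hm ih =>
    have hsplit : PySem.List.pyRange 1 (m + 1 : Nat) 1
        = PySem.List.pyRange 1 (m : Nat) 1 ++ [(m : Int)] := by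
      have := PySem.List.pyRange_one_succ_right (a := 1) (b := (m : Int)) (by exact_mod_cast hm)
      have hc : ((m + 1 : Nat) : Int) = (m : Int) + 1 := by push_cast; ring
      rw [hc, this]
    rw [hsplit, List.foldl_append, ih (by omega)]
    simp only [List.foldl_cons, List.foldl_nil]
    obtain ⟨m', rfl⟩ : ∃ m', m = m' + 1 := ⟨m - 1, by omega⟩
    have hcur : (isConsChar (PySem.List.pyGetD w ((m' + 1 : Nat) : Int) ' ') || !bcl w p0 (m' + 1 - 1))
        = bcl w p0 (m' + 1) := by
      rw [PySem.List.pyGetD_natCast]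
      simp only [Nat.add_sub_cancel]
      rfl
    have hlast : ((List.range (m' + 1)).map (fun k => clsChar (bcl w p0 k))).getLast?
        = some (clsChar (bcl w p0 m')) := by
      rw [List.range_succ, List.map_append]
      simp
    rw [List.range_succ (n := m' + 1), List.map_append, List.map_cons, List.map_nil,
      vcPairs_append_singleton, hlast]
    rw [Prod.mk.injEq]
    constructor
    · simpa using hcur
    · simp only [Nat.add_sub_cancel] at *
      rw [hcur]
      have hv : ∀ b : Bool, (clsChar b = 'v') = (b = false) := by
        intro b; cases b <;> simp [clsChar]
      by_cases hb : bcl w p0 m' = false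
      · by_cases hb1 : bcl w p0 (m' + 1) = true
        · simp [hb, hb1, clsChar]
        · have hb1' : bcl w p0 (m' + 1) = false := by simp_all
          simp [hb, hb1', clsChar]
      · have hb' : bcl w p0 m' = true := by simp_all
        by_cases hb1 : bcl w p0 (m' + 1) = true
        · simp [hb', hb1, clsChar]
        · have hb1' : bcl w p0 (m' + 1) = false := by simp_all
          simp [hb', hb1', clsChar]

theorem lastConsGo_spec (w : List Char) (k : Nat) (hk : k ≤ w.length) :
    (lastConsGo w k = -1 ∧ ∀ i : Nat, i < k → isConsChar (w.getD i ' ') = false) ∨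
    (∃ m : Nat, lastConsGo w k = (m : Int) ∧ m < k ∧ isConsChar (w.getD m ' ') = true ∧
      ∀ i : Nat, m < i → i < k → isConsChar (w.getD i ' ') = false) := by
  induction k with
  | zero => exact Or.inl ⟨rfl, by omega⟩
  | succ k ih =>
    have hk' : k ≤ w.length := by omega
    by_cases hc : isConsChar (w.getD k ' ') = true
    · refine Or.inr ⟨k, ?_, by omega, hc, by omega⟩
      simp [lastConsGo, PySem.List.pyGetD_natCast, List.getD_eq_getElem?_getD, hc, ← List.getD_eq_getElem?_getD]
    · have step : lastConsGo w (k + 1) = lastConsGo w k := by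
        simp [lastConsGo, PySem.List.pyGetD_natCast, List.getD_eq_getElem?_getD, hc, ← List.getD_eq_getElem?_getD]
      rcases ih hk' with ⟨h1, h2⟩ | ⟨m, h1, h2, h3, h4⟩
      · refine Or.inl ⟨step.trans h1, ?_⟩
        intro i hi
        rcases Nat.lt_succ_iff_lt_or_eq.mp hi with h | h
        · exact h2 i h
        · subst h; simpa using hc
      · refine Or.inr ⟨m, step.trans h1, by omega, h3, ?_⟩
        intro i hmi hi
        rcases Nat.lt_succ_iff_lt_or_eq.mp hi with h | h
        · exact h4 i hmi h
        · subst h; simpa using hc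

theorem main_eq (stem : String)
    (hpre : stem.toList = [] ∨ stem.toList.any (fun c => oromooConsonants.contains c) = true) :
    MeasureVC stem = MeasureVC_alt stem := by
  unfold MeasureVC MeasureVC_alt
  rcases hpre with h | hany
  · rw [h]
    simp [PySem.List.pyRange_one_eq_nil, countVC_eq, vcPairs_nil]
  · set w := stem.toList with hw
    have hne : w ≠ [] := by
      intro h; rw [h] at hany; simp at hany
    have hlen : 0 < w.length := List.length_pos_iff.mpr hne
    obtain ⟨c, hc, hcons⟩ := List.any_eq_true.mp hany
    obtain ⟨i, hi, hieq⟩ := List.mem_iff_getElem.mp hc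
    have hconsi : isConsChar (w.getD i ' ') = true := by
      rw [List.getD_eq_getElem?_getD, List.getElem?_eq_getElem hi]
      simpa [isConsChar, hieq] using hcons
    rcases lastConsGo_spec w w.length le_rfl with ⟨hneg, hall⟩ | ⟨m, hj, hm, hconsm, hlast'⟩
    · have h2 := hall i hi
      rw [hconsi] at h2
      simp at h2
    · have hlast'' : ∀ i : Nat, m < i → i < w.length → isConsChar (w.getD i ' ') = false :=
        fun i a b => hlast' i a b
      have h0get : PySem.List.pyGetD w 0 ' ' = w.getD 0 ' ' := by
        rw [show (0 : Int) = ((0 : Nat) : Int) by norm_num, PySem.List.pyGetD_natCast]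
      have h0 := isConsA_zero w m hlen hm hconsm hlast''
      have hpos := isConsA_pos w _ h0
      have hA := foldA w _ hpos w.length le_rfl
      have hB := foldB w (isConsChar (w.getD 0 ' ') || (PySem.Int.mod ((w.length : Int) - m) 2 == 0))
        w.length hlen le_rfl
      simp only [hj, h0get]
      simp only [hA, hB]
      rw [if_neg (by omega : ¬ w.length = 0), if_neg (by omega : ¬ ((m : Int) < 0))]
      rw [countVC_eq]

-- ===== VERDICT (by name: the statement is the Claim_ definition above) =====
theorem MeasureVC_spec : Claim_equal_MeasureVC := by
  intro stem _ hpre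
  exact main_eq stem hpre
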